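-- pv_equiv track=rewrite | github.com/udy11/coding-problems | project_euler/090.py | ps
-- ===== SOURCE A (Python) =====
-- def qq(a, b, n1, n2):
--     if (n1 in a and n2 in b) or (n1 in b and n2 in a):
--         return True
--     else:
--         return False
--
-- def q6(a, b, n):
--     na = n in a
--     nb = n in b
--     a6 = 6 in a or 9 in a
--     b6 = 6 in b or 9 in b
--     if na and (not nb):
--         if not b6:
--             return False
--     elif (not na) and nb:
--         if not a6:
--             return False
--     elif na and nb:
--         if (not a6) and (not b6):
--             return False
--     return True
--
-- def ps(a, b):
--
--     dd = [0, 1, 2, 3, 4, 5, 8]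
--     for d in dd:
--         if (not d in a) and (not d in b):
--             return False
--
--     if ((not 6 in a) and (not 6 in b)) and ((not 9 in a) and (not 9 in b)):
--         return False
--
--     if not qq(a, b, 0, 1):
--         return False
--
--     if not qq(a, b, 0, 4):
--         return False
--
--     if not q6(a, b, 0):
--         return False
--
--     if not q6(a, b, 1):
--         return False
--
--     if not qq(a, b, 2, 5):
--         return False
--
--     if not q6(a, b, 3):
--         return False
--
--     if not q6(a, b, 4):
--         return False
--
--     if not qq(a, b, 8, 1):
--         return False
--
--     return True
-- ===== SOURCE B (Python) =====
-- def ps(a, b):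
--     na = {6 if d == 9 else d for d in a}
--     nb = {6 if d == 9 else d for d in b}
--     pairs = [(0, 1), (0, 4), (0, 6), (1, 6), (2, 5), (3, 6), (4, 6), (8, 1)]
--     return all((x in na and y in nb) or (x in nb and y in na) for x, y in pairs)
-- ===== Notes on version B (the rewrite author's own statement) =====
-- stated objective: simpler
-- what changed: B normalizes each die into a set with 9 mapped to 6 and checks one table of square-digit pairs with all(), replacing A's separate digit-presence scan, 6/9 check, and the qq/q6 helper functions.
import Mathlib
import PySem

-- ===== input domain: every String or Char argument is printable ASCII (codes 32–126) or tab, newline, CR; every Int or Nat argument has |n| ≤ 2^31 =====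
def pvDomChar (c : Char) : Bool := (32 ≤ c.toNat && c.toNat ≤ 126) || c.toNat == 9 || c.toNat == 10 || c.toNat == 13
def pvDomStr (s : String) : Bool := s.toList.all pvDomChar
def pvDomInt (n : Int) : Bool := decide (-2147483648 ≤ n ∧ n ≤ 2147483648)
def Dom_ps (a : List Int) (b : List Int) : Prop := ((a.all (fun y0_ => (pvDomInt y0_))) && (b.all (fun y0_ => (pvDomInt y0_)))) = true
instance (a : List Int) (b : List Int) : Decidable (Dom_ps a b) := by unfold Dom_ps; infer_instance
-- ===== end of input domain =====

-- B (ps_alt) replaces A's presence scan and qq/q6 helpers by normalizing 9→6 into sets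
-- and checking one table of square-digit pairs (objective: simpler decomposition; same cost).

-- ===== PORT A =====
def qq (a : List Int) (b : List Int) (n1 : Int) (n2 : Int) : Bool :=
  if (a.contains n1 && b.contains n2) || (b.contains n1 && a.contains n2) then true else false

def q6 (a : List Int) (b : List Int) (n : Int) : Bool :=
  let na := a.contains n
  let nb := b.contains n
  let a6 := a.contains 6 || a.contains 9
  let b6 := b.contains 6 || b.contains 9
  if na && !nb then
    if !b6 then false else true
  else if !na && nb then
    if !a6 then false else true
  else if na && nb then
    if !a6 && !b6 then false else true
  else true

def ps (a : List Int) (b : List Int) : Bool :=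
  let dd : List Int := [0, 1, 2, 3, 4, 5, 8]
  if !(dd.all (fun d => a.contains d || b.contains d)) then false
  else if (!a.contains 6 && !b.contains 6) && (!a.contains 9 && !b.contains 9) then false
  else if !(qq a b 0 1) then false
  else if !(qq a b 0 4) then false
  else if !(q6 a b 0) then false
  else if !(q6 a b 1) then false
  else if !(qq a b 2 5) then false
  else if !(q6 a b 3) then false
  else if !(q6 a b 4) then false
  else if !(qq a b 8 1) then false
  else true

-- ===== PORT B =====
def ps_alt (a : List Int) (b : List Int) : Bool :=
  let na : PySem.Set Int := PySem.Set.ofList (a.map (fun d => if d = 9 then 6 else d))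
  let nb : PySem.Set Int := PySem.Set.ofList (b.map (fun d => if d = 9 then 6 else d))
  let pairs : List (Int × Int) := [(0, 1), (0, 4), (0, 6), (1, 6), (2, 5), (3, 6), (4, 6), (8, 1)]
  pairs.all (fun p =>
    (PySem.Set.contains na p.1 && PySem.Set.contains nb p.2) ||
    (PySem.Set.contains nb p.1 && PySem.Set.contains na p.2))

-- ===== PRECONDITION & SPEC =====
def Spec_ps (a : List Int) (b : List Int) (out : Bool) : Prop := out = ps_alt a b
instance (a : List Int) (b : List Int) (out : Bool) : Decidable (Spec_ps a b out) := by unfold Spec_ps; infer_instance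

-- ===== CLAIM (what is proved, stated in full; the proofs are below) =====
def Claim_equal_ps : Prop := ∀ (a : List Int) (b : List Int), Dom_ps a b → Spec_ps a b (ps a b)

-- ===== LEMMAS AND PROOFS =====

-- membership in the 9→6-normalized set, expressed over the original list
theorem contains_norm (a : List Int) (x : Int) (hx : x ≠ 9) :
    PySem.Set.contains (PySem.Set.ofList (a.map (fun d => if d = 9 then 6 else d))) x
      = (if x = 6 then a.contains 6 || a.contains 9 else a.contains x) := by
  have hset : PySem.Set.contains (PySem.Set.ofList (a.map (fun d => if d = 9 then 6 else d))) x
      = decide (x ∈ a.map (fun d => if d = 9 then 6 else d)) := by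
    simp [PySem.Set.contains_eq_listContains, PySem.Set.mem_ofList]
  rw [hset]
  by_cases h6 : x = 6
  · subst h6
    simp only [if_true, List.mem_map, List.contains_eq_mem, ← Bool.decide_or, decide_eq_decide]
    constructor
    · rintro ⟨d, hd, hdx⟩
      by_cases h9 : d = 9 <;> simp [h9] at hdx <;> subst_vars <;> tauto
    · rintro (h | h)
      · exact ⟨6, h, by simp⟩
      · exact ⟨9, h, by simp⟩
  · rw [if_neg h6]
    simp only [List.mem_map, List.contains_eq_mem, decide_eq_decide]
    constructor
    · rintro ⟨d, hd, hdx⟩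
      by_cases h9 : d = 9 <;> simp [h9] at hdx <;> subst_vars <;> tauto
    · intro h
      exact ⟨x, h, by simp [hx]⟩

-- the ite chain of ps flattens to a conjunction
theorem ite_false_and (c x : Bool) : (if c = true then false else x) = (!c && x) := by
  cases c <;> simp

theorem qq_eq (a b : List Int) (n1 n2 : Int) :
    qq a b n1 n2 = ((a.contains n1 && b.contains n2) || (b.contains n1 && a.contains n2)) := by
  unfold qq
  cases h : ((a.contains n1 && b.contains n2) || (b.contains n1 && a.contains n2)) <;> simp [h]

-- q6, given that n is present in a or b, is exactly the pair check of B
theorem q6_true_iff (a b : List Int) (n : Int) :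
    (q6 a b n = true) ↔
      ((a.contains n = true ∨ b.contains n = true) →
        ((a.contains n = true ∧ (b.contains 6 = true ∨ b.contains 9 = true)) ∨
         (b.contains n = true ∧ (a.contains 6 = true ∨ a.contains 9 = true)))) := by
  unfold q6
  cases h1 : a.contains n <;> cases h2 : b.contains n <;>
    cases h3 : (a.contains 6 || a.contains 9) <;> cases h4 : (b.contains 6 || b.contains 9) <;>
      simp_all

-- ===== VERDICT (by name: the statement is the Claim_ definition above) =====
theorem ps_spec : Claim_equal_ps := by
  intro a b _
  unfold Spec_ps
  have hA : ps a b =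
      ((a.contains 0 || b.contains 0) && ((a.contains 1 || b.contains 1) &&
       ((a.contains 2 || b.contains 2) && ((a.contains 3 || b.contains 3) &&
       ((a.contains 4 || b.contains 4) && ((a.contains 5 || b.contains 5) &&
       (a.contains 8 || b.contains 8)))))) &&
      (!((!a.contains 6 && !b.contains 6) && (!a.contains 9 && !b.contains 9)) &&
      (qq a b 0 1 && (qq a b 0 4 && (q6 a b 0 && (q6 a b 1 &&
       (qq a b 2 5 && (q6 a b 3 && (q6 a b 4 && qq a b 8 1))))))))) := by
    unfold ps
    simp only [List.all_cons, List.all_nil, Bool.and_true, ite_false_and, Bool.not_not]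
  have hB : ps_alt a b =
      (((a.contains 0 && b.contains 1) || (b.contains 0 && a.contains 1)) &&
      (((a.contains 0 && b.contains 4) || (b.contains 0 && a.contains 4)) &&
      (((a.contains 0 && (b.contains 6 || b.contains 9)) || (b.contains 0 && (a.contains 6 || a.contains 9))) &&
      (((a.contains 1 && (b.contains 6 || b.contains 9)) || (b.contains 1 && (a.contains 6 || a.contains 9))) &&
      (((a.contains 2 && b.contains 5) || (b.contains 2 && a.contains 5)) &&
      (((a.contains 3 && (b.contains 6 || b.contains 9)) || (b.contains 3 && (a.contains 6 || a.contains 9))) &&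
      (((a.contains 4 && (b.contains 6 || b.contains 9)) || (b.contains 4 && (a.contains 6 || a.contains 9))) &&
      ((a.contains 8 && b.contains 1) || (b.contains 8 && a.contains 1))))))))) := by
    unfold ps_alt
    simp only [List.all_cons, List.all_nil, Bool.and_true]
    rw [contains_norm a 0 (by decide), contains_norm b 0 (by decide),
        contains_norm a 1 (by decide), contains_norm b 1 (by decide),
        contains_norm a 2 (by decide), contains_norm b 2 (by decide),
        contains_norm a 3 (by decide), contains_norm b 3 (by decide),
        contains_norm a 4 (by decide), contains_norm b 4 (by decide),
        contains_norm a 5 (by decide), contains_norm b 5 (by decide),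
        contains_norm a 6 (by decide), contains_norm b 6 (by decide),
        contains_norm a 8 (by decide), contains_norm b 8 (by decide)]
    norm_num
  rw [hA, hB, Bool.eq_iff_iff]
  simp only [Bool.and_eq_true, Bool.or_eq_true, Bool.not_eq_true', Bool.and_eq_false_iff, qq_eq, q6_true_iff]
  constructor
  · rintro ⟨⟨h0, h1, h2, h3, h4, h5, h8⟩, h69, p01, p04, hq0, hq1, p25, hq3, hq4, p81⟩
    exact ⟨p01, p04, hq0 h0, hq1 h1, p25, hq3 h3, hq4 h4, p81⟩
  · rintro ⟨p01, p04, p06, p16, p25, p36, p46, p81⟩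
    refine ⟨⟨?_, ?_, ?_, ?_, ?_, ?_, ?_⟩, ?_, p01, p04, fun _ => p06, fun _ => p16, p25,
            fun _ => p36, fun _ => p46, p81⟩
    · rcases p01 with ⟨h, -⟩ | ⟨h, -⟩ <;> [exact Or.inl h; exact Or.inr h]
    · rcases p01 with ⟨-, h⟩ | ⟨-, h⟩ <;> [exact Or.inr h; exact Or.inl h]
    · rcases p25 with ⟨h, -⟩ | ⟨h, -⟩ <;> [exact Or.inl h; exact Or.inr h]
    · rcases p36 with ⟨h, -⟩ | ⟨h, -⟩ <;> [exact Or.inl h; exact Or.inr h]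
    · rcases p46 with ⟨h, -⟩ | ⟨h, -⟩ <;> [exact Or.inl h; exact Or.inr h]
    · rcases p25 with ⟨-, h⟩ | ⟨-, h⟩ <;> [exact Or.inr h; exact Or.inl h]
    · rcases p81 with ⟨h, -⟩ | ⟨h, -⟩ <;> [exact Or.inl h; exact Or.inr h]
    · -- 6 or 9 appears somewhere: read it off the (1,6) pair
      rcases p16 with ⟨-, h | h⟩ | ⟨-, h | h⟩
      · exact Or.inl (Or.inr (by simpa using h))
      · exact Or.inr (Or.inr (by simpa using h))
      · exact Or.inl (Or.inl (by simpa using h))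
      · exact Or.inr (Or.inl (by simpa using h))
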